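-- pv_equiv track=rewrite | github.com/sean821111/Thor | src/lib/sig_proc.py | find_peak_valley
-- ===== SOURCE A (Python) =====
-- import math
--
-- def find_peak_valley(sample_rate, filtered_ppg):
--       #find-peak
--     medium_max_count = 0
--     medium_min_count = 0
--     peak_count =0
--     valley_count = 0
--     ppg_peak_x =[] # peak location index
--     ppg_valley_x =[] # valley location index
--     adaptive_windows_size_min = math.ceil(sample_rate*0.25/2)  #最小時窗一半
--     adaptive_windows_size_max = math.ceil(sample_rate/2) #最大時窗一半
--     adaptive_windows_size = adaptive_windows_size_min #初始設定windows大小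
--     for i in  range(len(filtered_ppg)):
--         if ((i > adaptive_windows_size) and (i <len(filtered_ppg)-adaptive_windows_size)):
--             if (adaptive_windows_size > adaptive_windows_size_max):
--                 adaptive_windows_size = adaptive_windows_size_max
--             #找峰值
--             for j in range(math.ceil(adaptive_windows_size +1)):
--                 if ((filtered_ppg[i] > filtered_ppg[i -j])  and (filtered_ppg[i] >= filtered_ppg[i + j]) ):
--                     medium_max_count = medium_max_count + 1
--                     #中間大於左右次數
--                     if (medium_max_count == math.ceil(adaptive_windows_size)):
--
--                         #如 a = adaptive_windows_size 可知 ppg_data(x,1)為最大值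
--                         ppg_peak_x.append(i)
--
--                         if (len(ppg_peak_x) > 1 ): #更新視窗寬度
--                             adaptive_windows_size = math.ceil ((ppg_peak_x [peak_count] - ppg_peak_x [peak_count-1]) / 2) ;
--
--                         peak_count+=1
--                 elif ((filtered_ppg[i] < filtered_ppg[i -j])  and (filtered_ppg[i] <= filtered_ppg[i + j]) and len(ppg_peak_x)>0 ):
--                     medium_min_count = medium_min_count +1
--                     #中間小於左右次數
--                     if (medium_min_count == math.ceil(adaptive_windows_size)):
--                         ppg_valley_x.append(i)
--                         valley_count+=1
--         medium_max_count = 0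
--         medium_min_count = 0
--
--     return  ppg_peak_x, ppg_valley_x
-- ===== SOURCE B (Python) =====
-- import math
--
-- def find_peak_valley(sample_rate, filtered_ppg):
--     # Sparse-table formulation: precompute doubling range-max/min tables once
--     # (O(n log n)), then each adaptive-window peak/valley test is two O(1)
--     # overlapping range queries instead of a per-sample inner scan.
--     n = len(filtered_ppg)
--     mx = [filtered_ppg]
--     mn = [filtered_ppg]
--     k = 1
--     while (1 << k) <= n:
--         pmx, pmn = mx[-1], mn[-1]
--         half = 1 << (k - 1)
--         mx.append([max(pmx[j], pmx[j + half]) for j in range(n - (1 << k) + 1)])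
--         mn.append([min(pmn[j], pmn[j + half]) for j in range(n - (1 << k) + 1)])
--         k += 1
--
--     def rmax(a, b):  # max(filtered_ppg[a..b]) inclusive, 0 <= a <= b < n
--         k = (b - a + 1).bit_length() - 1
--         return max(mx[k][a], mx[k][b - (1 << k) + 1])
--
--     def rmin(a, b):
--         k = (b - a + 1).bit_length() - 1
--         return min(mn[k][a], mn[k][b - (1 << k) + 1])
--
--     w_max = math.ceil(sample_rate / 2)
--     w = math.ceil(sample_rate * 0.25 / 2)
--     peaks = []
--     valleys = []
--     for i in range(n):
--         if w < i < n - w: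
--             if w > w_max:
--                 w = w_max
--             if w >= 1:
--                 v = filtered_ppg[i]
--                 if v > rmax(i - w, i - 1) and v >= rmax(i + 1, i + w):
--                     peaks.append(i)
--                     if len(peaks) > 1:
--                         w = math.ceil((peaks[-1] - peaks[-2]) / 2)
--                 elif peaks and v < rmin(i - w, i - 1) and v <= rmin(i + 1, i + w):
--                     valleys.append(i)
--     return peaks, valleys
-- ===== Notes on version B (the rewrite author's own statement) =====
-- stated objective: faster
-- what changed: B precomputes sparse-table (doubling) range-max and range-min tables over the signal once and decides each adaptive-window peak/valley test with two O(1) overlapping range queries, eliminating A's per-sample inner counting loop over the window.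
import Mathlib
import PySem

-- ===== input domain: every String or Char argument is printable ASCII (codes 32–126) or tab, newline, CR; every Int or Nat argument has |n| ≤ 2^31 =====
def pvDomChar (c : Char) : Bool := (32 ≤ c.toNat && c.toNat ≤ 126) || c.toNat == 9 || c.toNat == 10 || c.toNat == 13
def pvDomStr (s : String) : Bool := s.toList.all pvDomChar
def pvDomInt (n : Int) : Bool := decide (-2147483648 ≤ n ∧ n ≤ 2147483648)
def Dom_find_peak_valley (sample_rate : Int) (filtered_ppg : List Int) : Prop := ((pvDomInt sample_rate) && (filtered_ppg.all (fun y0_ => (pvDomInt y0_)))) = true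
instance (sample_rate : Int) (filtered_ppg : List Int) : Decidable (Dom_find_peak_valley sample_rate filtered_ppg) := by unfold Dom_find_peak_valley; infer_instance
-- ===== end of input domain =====

-- B precomputes doubling (sparse-table) range-max/min tables once and answers each
-- adaptive-window peak/valley test with two overlapping range queries, replacing A's
-- per-sample inner counting scan; objective: faster (O(n log n) vs O(n·w)).

-- ===== PORT A =====
-- ceiling division -((-a) // b); ports Python's math.ceil(x / b) (exact: all float ops involved are exact on |int| ≤ 2^31 inputs)
def pyCeilDiv (a b : Int) : Int := -(PySem.Int.floordiv (-a) b)

structure FpvSt where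
  mmax : Int
  mmin : Int
  pc : Int
  vc : Int
  peaks : List Int
  valleys : List Int
  w : Int
deriving Repr, DecidableEq

-- the body of A's inner j-loop (indices i-j, i+j, peaks[pc], peaks[pc-1] are always in
-- range when this runs, so pyGetD's default 0 is never used)
def fpvStepJ (ppg : List Int) (i : Int) (s : FpvSt) (j : Int) : FpvSt :=
  if PySem.List.pyGetD ppg i 0 > PySem.List.pyGetD ppg (i - j) 0 ∧
     PySem.List.pyGetD ppg i 0 ≥ PySem.List.pyGetD ppg (i + j) 0 then
    let mmax := s.mmax + 1
    if mmax = s.w then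
      let peaks := s.peaks ++ [i]
      let w := if 1 < (peaks.length : Int) then
          pyCeilDiv (PySem.List.pyGetD peaks s.pc 0 - PySem.List.pyGetD peaks (s.pc - 1) 0) 2
        else s.w
      { s with mmax := mmax, peaks := peaks, w := w, pc := s.pc + 1 }
    else { s with mmax := mmax }
  else if PySem.List.pyGetD ppg i 0 < PySem.List.pyGetD ppg (i - j) 0 ∧
          PySem.List.pyGetD ppg i 0 ≤ PySem.List.pyGetD ppg (i + j) 0 ∧
          0 < (s.peaks.length : Int) then
    let mmin := s.mmin + 1
    if mmin = s.w then
      { s with mmin := mmin, valleys := s.valleys ++ [i], vc := s.vc + 1 }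
    else { s with mmin := mmin }
  else s

-- the body of A's outer i-loop (math.ceil on the int-valued window size is the identity)
def fpvStepI (ppg : List Int) (n wmax : Int) (s : FpvSt) (i : Int) : FpvSt :=
  if s.w < i ∧ i < n - s.w then
    let s1 := if wmax < s.w then { s with w := wmax } else s
    let s2 := (PySem.List.pyRange 0 (s1.w + 1) 1).foldl (fpvStepJ ppg i) s1
    { s2 with mmax := 0, mmin := 0 }
  else { s with mmax := 0, mmin := 0 }

def find_peak_valley (sample_rate : Int) (filtered_ppg : List Int) : List Int × List Int :=
  let n : Int := (filtered_ppg.length : Int)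
  let wmin := pyCeilDiv sample_rate 8      -- math.ceil(sample_rate*0.25/2)
  let wmax := pyCeilDiv sample_rate 2      -- math.ceil(sample_rate/2)
  let fin := (PySem.List.pyRange 0 n 1).foldl (fpvStepI filtered_ppg n wmax) ⟨0, 0, 0, 0, [], [], wmin⟩
  (fin.peaks, fin.valleys)

-- ===== PORT B =====
-- Python's (m).bit_length() for m ≥ 0
def pyBitLength : Nat → Nat
  | 0 => 0
  | n + 1 => pyBitLength ((n + 1) / 2) + 1

-- Source B's while loop building sparse-table levels k, k+1, … (fuel bounds the number of
-- iterations; the guard 2^k ≤ n is the while condition, so fuel ≥ n never cuts it short)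
def stBuild (f : Int → Int → Int) (prev : List Int) (n k fuel : Nat) : List (List Int) :=
  match fuel with
  | 0 => []
  | fuel + 1 =>
    if 2 ^ k ≤ n then
      let cur := (List.range (n - 2 ^ k + 1)).map
        (fun j => f (prev.getD j 0) (prev.getD (j + 2 ^ (k - 1)) 0))
      cur :: stBuild f cur n (k + 1) fuel
    else []

-- Source B's rmax/rmin: overlapping-windows range query on the levels (indices are always
-- in range when called, so the defaults are never used)
def stQuery (levels : List (List Int)) (f : Int → Int → Int) (a b : Int) : Int :=
  let k := pyBitLength (b - a + 1).toNat - 1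
  let row := levels.getD k []
  f (PySem.List.pyGetD row a 0) (PySem.List.pyGetD row (b - (2 ^ k : Nat) + 1) 0)

structure FpvAltSt where
  peaks : List Int
  valleys : List Int
  w : Int
deriving Repr, DecidableEq

-- the body of B's loop: two O(1) range queries per candidate index
def fpvAltStep (ppg : List Int) (mx mn : List (List Int)) (n wmax : Int)
    (s : FpvAltSt) (i : Int) : FpvAltSt :=
  if s.w < i ∧ i < n - s.w then
    let w := if wmax < s.w then wmax else s.w
    if 1 ≤ w then
      let v := PySem.List.pyGetD ppg i 0
      if v > stQuery mx (fun a b => max a b) (i - w) (i - 1) ∧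
         v ≥ stQuery mx (fun a b => max a b) (i + 1) (i + w) then
        let peaks := s.peaks ++ [i]
        let w' := if 1 < (peaks.length : Int) then
            pyCeilDiv (PySem.List.pyGetD peaks (-1) 0 - PySem.List.pyGetD peaks (-2) 0) 2
          else w
        ⟨peaks, s.valleys, w'⟩
      else if s.peaks ≠ [] ∧ v < stQuery mn (fun a b => min a b) (i - w) (i - 1) ∧
              v ≤ stQuery mn (fun a b => min a b) (i + 1) (i + w) then
        ⟨s.peaks, s.valleys ++ [i], w⟩
      else ⟨s.peaks, s.valleys, w⟩
    else ⟨s.peaks, s.valleys, w⟩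
  else s

def find_peak_valley_alt (sample_rate : Int) (filtered_ppg : List Int) : List Int × List Int :=
  let n : Int := (filtered_ppg.length : Int)
  let mx := filtered_ppg :: stBuild (fun a b => max a b) filtered_ppg filtered_ppg.length 1 filtered_ppg.length
  let mn := filtered_ppg :: stBuild (fun a b => min a b) filtered_ppg filtered_ppg.length 1 filtered_ppg.length
  let wmax := pyCeilDiv sample_rate 2
  let w0 := pyCeilDiv sample_rate 8
  let fin := (PySem.List.pyRange 0 n 1).foldl (fpvAltStep filtered_ppg mx mn n wmax) ⟨[], [], w0⟩
  (fin.peaks, fin.valleys)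

-- ===== PRECONDITION & SPEC =====
def Spec_find_peak_valley (sample_rate : Int) (filtered_ppg : List Int) (out : List Int × List Int) : Prop := out = find_peak_valley_alt sample_rate filtered_ppg
instance (sample_rate : Int) (filtered_ppg : List Int) (out : List Int × List Int) : Decidable (Spec_find_peak_valley sample_rate filtered_ppg out) := by unfold Spec_find_peak_valley; infer_instance

-- ===== CLAIM (what is proved, stated in full; the proofs are below) =====
def Claim_equal_find_peak_valley : Prop := ∀ (sample_rate : Int) (filtered_ppg : List Int), Dom_find_peak_valley sample_rate filtered_ppg → Spec_find_peak_valley sample_rate filtered_ppg (find_peak_valley sample_rate filtered_ppg)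

-- ===== LEMMAS AND PROOFS =====

-- correspondence between A's and B's loop states
def FpvRel (sa : FpvSt) (sb : FpvAltSt) : Prop :=
  sa.mmax = 0 ∧ sa.mmin = 0 ∧ sa.pc = (sa.peaks.length : Int) ∧
  sa.peaks = sb.peaks ∧ sa.valleys = sb.valleys ∧ sa.w = sb.w

-- the two per-offset comparisons of A's inner loop, as Booleans
def fpvP (ppg : List Int) (i j : Int) : Bool :=
  decide (PySem.List.pyGetD ppg i 0 > PySem.List.pyGetD ppg (i - j) 0) &&
  decide (PySem.List.pyGetD ppg i 0 ≥ PySem.List.pyGetD ppg (i + j) 0)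

def fpvQ (ppg : List Int) (i j : Int) : Bool :=
  decide (PySem.List.pyGetD ppg i 0 < PySem.List.pyGetD ppg (i - j) 0) &&
  decide (PySem.List.pyGetD ppg i 0 ≤ PySem.List.pyGetD ppg (i + j) 0)

-- the composite predicate counted by A's valley counter
def fpvQB (ppg : List Int) (i : Int) (pk : List Int) (j : Int) : Bool :=
  !fpvP ppg i j && fpvQ ppg i j && decide (0 < (pk.length : Int))

-- running counts of A's two counters over offsets 1..m
def fpvCP (ppg : List Int) (i : Int) (m : Nat) : Nat :=
  (List.range m).countP (fun k => fpvP ppg i ((k : Int) + 1))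

def fpvCQ (ppg : List Int) (i : Int) (pk : List Int) (m : Nat) : Nat :=
  (List.range m).countP (fun k => fpvQB ppg i pk ((k : Int) + 1))

theorem fpvQB_iff (ppg : List Int) (i : Int) (pk : List Int) (j : Int) :
    fpvQB ppg i pk j = true ↔
      (fpvP ppg i j = false ∧ fpvQ ppg i j = true ∧ 0 < (pk.length : Int)) := by
  simp [fpvQB, and_assoc]

theorem fpvP_iff (ppg : List Int) (i j : Int) :
    fpvP ppg i j = true ↔
      (PySem.List.pyGetD ppg i 0 > PySem.List.pyGetD ppg (i - j) 0 ∧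
       PySem.List.pyGetD ppg i 0 ≥ PySem.List.pyGetD ppg (i + j) 0) := by
  simp [fpvP]

theorem fpvQ_iff (ppg : List Int) (i j : Int) :
    fpvQ ppg i j = true ↔
      (PySem.List.pyGetD ppg i 0 < PySem.List.pyGetD ppg (i - j) 0 ∧
       PySem.List.pyGetD ppg i 0 ≤ PySem.List.pyGetD ppg (i + j) 0) := by
  simp [fpvQ]

theorem fpvQ_not_P (ppg : List Int) (i j : Int) (h : fpvQ ppg i j = true) :
    fpvP ppg i j = false := by
  simp [fpvP, fpvQ] at *
  omega

theorem fpvCP_succ (ppg : List Int) (i : Int) (m : Nat) :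
    fpvCP ppg i (m + 1) = fpvCP ppg i m + (if fpvP ppg i ((m : Int) + 1) = true then 1 else 0) := by
  simp [fpvCP, List.range_succ, List.countP_append, List.countP_cons]

theorem fpvCQ_succ (ppg : List Int) (i : Int) (pk : List Int) (m : Nat) :
    fpvCQ ppg i pk (m + 1) = fpvCQ ppg i pk m + (if fpvQB ppg i pk ((m : Int) + 1) = true then 1 else 0) := by
  simp [fpvCQ, List.range_succ, List.countP_append, List.countP_cons]

theorem fpvCP_le (ppg : List Int) (i : Int) (m : Nat) : fpvCP ppg i m ≤ m := by
  induction m with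
  | zero => simp [fpvCP]
  | succ m ih => rw [fpvCP_succ]; split <;> omega

theorem fpvCQ_le (ppg : List Int) (i : Int) (pk : List Int) (m : Nat) : fpvCQ ppg i pk m ≤ m := by
  induction m with
  | zero => simp [fpvCQ]
  | succ m ih => rw [fpvCQ_succ]; split <;> omega

theorem fpvCP_mono (ppg : List Int) (i : Int) (m : Nat) : fpvCP ppg i m ≤ fpvCP ppg i (m + 1) := by
  rw [fpvCP_succ]; omega

theorem fpvCQ_mono (ppg : List Int) (i : Int) (pk : List Int) (m : Nat) :
    fpvCQ ppg i pk m ≤ fpvCQ ppg i pk (m + 1) := by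
  rw [fpvCQ_succ]; omega

theorem fpvCP_eq_iff (ppg : List Int) (i : Int) (m : Nat) :
    fpvCP ppg i m = m ↔ ∀ k : Nat, k < m → fpvP ppg i ((k : Int) + 1) = true := by
  induction m with
  | zero => simp [fpvCP]
  | succ m ih =>
    rw [fpvCP_succ]
    by_cases hp : fpvP ppg i ((m : Int) + 1) = true
    · rw [if_pos hp]
      constructor
      · intro h k hk
        rcases Nat.lt_or_ge k m with hk' | hk'
        · exact ih.1 (by omega) k hk'
        · have hkm : k = m := by omega
          subst hkm; exact hp
      · intro h
        have := ih.2 (fun k hk => h k (by omega))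
        omega
    · rw [if_neg hp]
      constructor
      · intro h
        have := fpvCP_le ppg i m
        omega
      · intro h
        exact absurd (h m (by omega)) hp

theorem fpvCQ_eq_iff (ppg : List Int) (i : Int) (pk : List Int) (m : Nat) :
    fpvCQ ppg i pk m = m ↔ ∀ k : Nat, k < m → fpvQB ppg i pk ((k : Int) + 1) = true := by
  induction m with
  | zero => simp [fpvCQ]
  | succ m ih =>
    rw [fpvCQ_succ]
    by_cases hp : fpvQB ppg i pk ((m : Int) + 1) = true
    · rw [if_pos hp]
      constructor
      · intro h k hk
        rcases Nat.lt_or_ge k m with hk' | hk'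
        · exact ih.1 (by omega) k hk'
        · have hkm : k = m := by omega
          subst hkm; exact hp
      · intro h
        have := ih.2 (fun k hk => h k (by omega))
        omega
    · rw [if_neg hp]
      constructor
      · intro h
        have := fpvCQ_le ppg i pk m
        omega
      · intro h
        exact absurd (h m (by omega)) hp

theorem fpvCQ_zero_of_allP (ppg : List Int) (i : Int) (pk : List Int) (m : Nat)
    (h : ∀ k : Nat, k < m → fpvP ppg i ((k : Int) + 1) = true) : fpvCQ ppg i pk m = 0 := by
  induction m with
  | zero => simp [fpvCQ]
  | succ m ih =>
    rw [fpvCQ_succ, ih (fun k hk => h k (by omega))]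
    have := h m (by omega)
    simp [fpvQB, this]

theorem fpvCQ_eq_of_allQ (ppg : List Int) (i : Int) (pk : List Int) (m : Nat) (hpk : pk ≠ [])
    (h : ∀ k : Nat, k < m → fpvQ ppg i ((k : Int) + 1) = true) : fpvCQ ppg i pk m = m := by
  rw [fpvCQ_eq_iff]
  intro k hk
  rw [fpvQB_iff]
  refine ⟨fpvQ_not_P ppg i _ (h k hk), h k hk, ?_⟩
  have := List.length_pos_of_ne_nil hpk
  omega

theorem fpvCP_zero_of_allQ (ppg : List Int) (i : Int) (m : Nat)
    (h : ∀ k : Nat, k < m → fpvQ ppg i ((k : Int) + 1) = true) : fpvCP ppg i m = 0 := by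
  induction m with
  | zero => simp [fpvCP]
  | succ m ih =>
    rw [fpvCP_succ, ih (fun k hk => h k (by omega))]
    simp [fpvQ_not_P ppg i _ (h m (by omega))]

-- stepJ at offset 0 does nothing
theorem fpvStepJ_zero (ppg : List Int) (i : Int) (s : FpvSt) : fpvStepJ ppg i s 0 = s := by
  simp [fpvStepJ]

-- A's inner loop up to offset m, while neither counter has reached w yet: pure counting
theorem fpv_inner_partial (ppg : List Int) (i w pc vc : Int) (pk vl : List Int) :
    ∀ m : Nat, (m : Int) ≤ w → ((fpvCP ppg i m : Int) < w) → ((fpvCQ ppg i pk m : Int) < w) →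
      (PySem.List.pyRange 0 ((m : Int) + 1) 1).foldl (fpvStepJ ppg i) ⟨0, 0, pc, vc, pk, vl, w⟩
        = ⟨(fpvCP ppg i m : Int), (fpvCQ ppg i pk m : Int), pc, vc, pk, vl, w⟩ := by
  intro m
  induction m with
  | zero =>
    intro _ _ _
    have h1 : PySem.List.pyRange 0 (((0 : Nat) : Int) + 1) 1 = [0] := by
      rw [PySem.List.pyRange_one_cons (by omega), PySem.List.pyRange_one_eq_nil (by omega)]
    rw [h1]
    simp [fpvStepJ_zero, fpvCP, fpvCQ]
  | succ m ih =>
    intro hm hcp hcq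
    have hc : (((m + 1 : Nat)) : Int) = (m : Int) + 1 := by push_cast; ring
    rw [hc] at hm ⊢
    have hcp' : ((fpvCP ppg i m : Int)) < w := by
      have h1 := fpvCP_mono ppg i m
      have h2 : ((fpvCP ppg i (m+1) : Nat) : Int) < w := by exact_mod_cast hcp
      omega
    have hcq' : ((fpvCQ ppg i pk m : Int)) < w := by
      have h1 := fpvCQ_mono ppg i pk m
      have h2 : ((fpvCQ ppg i pk (m+1) : Nat) : Int) < w := by exact_mod_cast hcq
      omega
    have hr := PySem.List.pyRange_one_succ_right (a := 0) (b := (m : Int) + 1) (by omega)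
    rw [hr, List.foldl_append, ih (by omega) hcp' hcq']
    simp only [List.foldl_cons, List.foldl_nil]
    rw [fpvStepJ]
    by_cases hp : fpvP ppg i ((m : Int) + 1) = true
    · rw [if_pos ((fpvP_iff ppg i _).1 hp)]
      have hcpS : fpvCP ppg i (m + 1) = fpvCP ppg i m + 1 := by
        rw [fpvCP_succ, if_pos hp]
      have hne : ¬ ((fpvCP ppg i m : Int) + 1 = w) := by
        rw [hcpS] at hcp; push_cast at hcp; omega
      have hcqS : fpvCQ ppg i pk (m + 1) = fpvCQ ppg i pk m := by
        rw [fpvCQ_succ, if_neg (by rw [fpvQB_iff]; rintro ⟨hp', _, _⟩; simp [hp'] at hp)]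
        exact Nat.add_zero _
      rw [if_neg hne, hcpS, hcqS]
      simp only [FpvSt.mk.injEq, eq_self_iff_true, and_true, true_and]
      push_cast
      ring
    · rw [if_neg (fun hco => by
        have : fpvP ppg i ((m : Int) + 1) = true := (fpvP_iff ppg i _).2 hco
        exact hp this)]
      have hcpS : fpvCP ppg i (m + 1) = fpvCP ppg i m := by
        rw [fpvCP_succ, if_neg hp]
        exact Nat.add_zero _
      by_cases hq : (fpvQ ppg i ((m : Int) + 1) = true ∧ 0 < (pk.length : Int))
      · rw [if_pos ⟨((fpvQ_iff ppg i _).1 hq.1).1, ((fpvQ_iff ppg i _).1 hq.1).2, hq.2⟩]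
        have hqb : fpvQB ppg i pk ((m : Int) + 1) = true := by
          rw [fpvQB_iff]
          exact ⟨by simp at hp; simp [hp], hq.1, hq.2⟩
        have hcqS : fpvCQ ppg i pk (m + 1) = fpvCQ ppg i pk m + 1 := by
          rw [fpvCQ_succ, if_pos hqb]
        have hne : ¬ ((fpvCQ ppg i pk m : Int) + 1 = w) := by
          rw [hcqS] at hcq; push_cast at hcq; omega
        rw [if_neg hne, hcpS, hcqS]
        simp only [FpvSt.mk.injEq, eq_self_iff_true, and_true, true_and]
        push_cast
        ring
      · have hcond : ¬ (PySem.List.pyGetD ppg i 0 < PySem.List.pyGetD ppg (i - ((m : Int) + 1)) 0 ∧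
            PySem.List.pyGetD ppg i 0 ≤ PySem.List.pyGetD ppg (i + ((m : Int) + 1)) 0 ∧
            0 < (pk.length : Int)) := by
          intro hco
          exact hq ⟨(fpvQ_iff ppg i _).2 ⟨hco.1, hco.2.1⟩, hco.2.2⟩
        rw [if_neg hcond]
        have hcqS : fpvCQ ppg i pk (m + 1) = fpvCQ ppg i pk m := by
          rw [fpvCQ_succ, if_neg (by
            rw [fpvQB_iff]
            rintro ⟨-, hq', hl⟩
            exact hq ⟨hq', hl⟩)]
          exact Nat.add_zero _
        rw [hcpS, hcqS]

-- the inner loop does nothing when the window is non-positive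
theorem fpv_inner_trivial (ppg : List Int) (i w : Int) (s : FpvSt) (hw : w ≤ 0) :
    (PySem.List.pyRange 0 (w + 1) 1).foldl (fpvStepJ ppg i) s = s := by
  rcases lt_or_eq_of_le hw with hlt | heq
  · rw [PySem.List.pyRange_one_eq_nil (by omega)]
    rfl
  · subst heq
    have h1 : PySem.List.pyRange 0 (0 + 1) 1 = [0] := by
      rw [PySem.List.pyRange_one_cons (by omega), PySem.List.pyRange_one_eq_nil (by omega)]
    rw [h1]
    simp [fpvStepJ_zero]

-- full inner loop, peak case: all offsets 1..w pass the peak test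
theorem fpv_inner_peak (ppg : List Int) (i w pc vc : Int) (pk vl : List Int) (hw : 1 ≤ w)
    (hall : ∀ j : Int, 1 ≤ j → j ≤ w → fpvP ppg i j = true) :
    (PySem.List.pyRange 0 (w + 1) 1).foldl (fpvStepJ ppg i) ⟨0, 0, pc, vc, pk, vl, w⟩
      = ⟨w, 0, pc + 1, vc, pk ++ [i],
          vl,
          (if 1 < (((pk ++ [i]).length : Nat) : Int) then
            pyCeilDiv (PySem.List.pyGetD (pk ++ [i]) pc 0 - PySem.List.pyGetD (pk ++ [i]) (pc - 1) 0) 2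
          else w)⟩ := by
  set m : Nat := (w - 1).toNat with hmdef
  have hm : (m : Int) = w - 1 := by omega
  have hallm : ∀ k : Nat, k < m → fpvP ppg i ((k : Int) + 1) = true := by
    intro k hk
    exact hall _ (by omega) (by omega)
  have hcp : fpvCP ppg i m = m := (fpvCP_eq_iff ppg i m).2 hallm
  have hcq : fpvCQ ppg i pk m = 0 := fpvCQ_zero_of_allP ppg i pk m hallm
  have hpart := fpv_inner_partial ppg i w pc vc pk vl m (by omega) (by rw [hcp]; omega)
    (by rw [hcq]; omega)
  have hsplit : PySem.List.pyRange 0 (w + 1) 1 = PySem.List.pyRange 0 ((m : Int) + 1) 1 ++ [w] := by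
    rw [PySem.List.pyRange_one_succ_right (a := 0) (b := w) (by omega)]
    congr 2
    omega
  rw [hsplit, List.foldl_append, hpart]
  simp only [List.foldl_cons, List.foldl_nil]
  rw [fpvStepJ]
  rw [if_pos ((fpvP_iff ppg i w).1 (hall w (by omega) (by omega)))]
  rw [if_pos (by rw [hcp]; omega : ((fpvCP ppg i m : Nat) : Int) + 1 = w)]
  rw [hcp, hcq]
  simp [FpvSt.mk.injEq]
  omega

-- full inner loop, valley case: peaks already found and all offsets pass the valley test
theorem fpv_inner_valley (ppg : List Int) (i w pc vc : Int) (pk vl : List Int) (hw : 1 ≤ w)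
    (hpk : pk ≠ [])
    (hall : ∀ j : Int, 1 ≤ j → j ≤ w → fpvQ ppg i j = true) :
    (PySem.List.pyRange 0 (w + 1) 1).foldl (fpvStepJ ppg i) ⟨0, 0, pc, vc, pk, vl, w⟩
      = ⟨0, w, pc, vc + 1, pk, vl ++ [i], w⟩ := by
  set m : Nat := (w - 1).toNat with hmdef
  have hm : (m : Int) = w - 1 := by omega
  have hallm : ∀ k : Nat, k < m → fpvQ ppg i ((k : Int) + 1) = true := by
    intro k hk
    exact hall _ (by omega) (by omega)
  have hcp : fpvCP ppg i m = 0 := fpvCP_zero_of_allQ ppg i m hallm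
  have hcq : fpvCQ ppg i pk m = m := fpvCQ_eq_of_allQ ppg i pk m hpk hallm
  have hpart := fpv_inner_partial ppg i w pc vc pk vl m (by omega) (by rw [hcp]; omega)
    (by rw [hcq]; omega)
  have hsplit : PySem.List.pyRange 0 (w + 1) 1 = PySem.List.pyRange 0 ((m : Int) + 1) 1 ++ [w] := by
    rw [PySem.List.pyRange_one_succ_right (a := 0) (b := w) (by omega)]
    congr 2
    omega
  rw [hsplit, List.foldl_append, hpart]
  simp only [List.foldl_cons, List.foldl_nil]
  rw [fpvStepJ]
  have hqw := (fpvQ_iff ppg i w).1 (hall w (by omega) (by omega))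
  have hpw : fpvP ppg i w = false := fpvQ_not_P ppg i w (hall w (by omega) (by omega))
  rw [if_neg (by rw [← fpvP_iff ppg i w]; simp [hpw])]
  have hlen : 0 < (pk.length : Int) := by
    have := List.length_pos_of_ne_nil hpk
    omega
  rw [if_pos ⟨hqw.1, hqw.2, hlen⟩]
  rw [if_pos (by rw [hcq]; omega : ((fpvCQ ppg i pk m : Nat) : Int) + 1 = w)]
  rw [hcp, hcq]
  simp [FpvSt.mk.injEq]
  omega

-- the valley counter counts nothing while no peak has been seen
theorem fpvCQ_zero_of_nopk (ppg : List Int) (i : Int) (pk : List Int) (m : Nat)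
    (h : ¬ 0 < (pk.length : Int)) : fpvCQ ppg i pk m = 0 := by
  induction m with
  | zero => simp [fpvCQ]
  | succ m ih =>
    rw [fpvCQ_succ, ih, if_neg (by rw [fpvQB_iff]; rintro ⟨-, -, hl⟩; exact h hl)]

-- full inner loop, neutral case: neither test passes at every offset, nothing is appended
theorem fpv_inner_none (ppg : List Int) (i w pc vc : Int) (pk vl : List Int) (hw : 1 ≤ w)
    (hnp : ¬ ∀ j : Int, 1 ≤ j → j ≤ w → fpvP ppg i j = true)
    (hnq : ¬ (0 < (pk.length : Int) ∧ ∀ j : Int, 1 ≤ j → j ≤ w → fpvQ ppg i j = true)) :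
    ∃ cp cq : Int,
      (PySem.List.pyRange 0 (w + 1) 1).foldl (fpvStepJ ppg i) ⟨0, 0, pc, vc, pk, vl, w⟩
        = ⟨cp, cq, pc, vc, pk, vl, w⟩ := by
  set m : Nat := w.toNat with hmdef
  have hm : (m : Int) = w := by omega
  have hsplit : PySem.List.pyRange 0 (w + 1) 1 = PySem.List.pyRange 0 ((m : Int) + 1) 1 := by
    congr 2
    omega
  have hcp : fpvCP ppg i m < m := by
    push_neg at hnp
    obtain ⟨j, hj1, hjw, hj⟩ := hnp
    have hne : fpvCP ppg i m ≠ m := by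
      intro he
      apply hj
      have := (fpvCP_eq_iff ppg i m).1 he (j - 1).toNat (by omega)
      rwa [show (((j - 1).toNat : Nat) : Int) + 1 = j by omega] at this
    exact lt_of_le_of_ne (fpvCP_le ppg i m) hne
  have hcq : fpvCQ ppg i pk m < m := by
    by_cases hl : 0 < (pk.length : Int)
    · have hnq' : ¬ ∀ j : Int, 1 ≤ j → j ≤ w → fpvQ ppg i j = true := fun ha => hnq ⟨hl, ha⟩
      push_neg at hnq'
      obtain ⟨j, hj1, hjw, hj⟩ := hnq'
      have hne : fpvCQ ppg i pk m ≠ m := by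
        intro he
        apply hj
        have := (fpvCQ_eq_iff ppg i pk m).1 he (j - 1).toNat (by omega)
        rw [show (((j - 1).toNat : Nat) : Int) + 1 = j by omega] at this
        exact ((fpvQB_iff ppg i pk j).1 this).2.1
      exact lt_of_le_of_ne (fpvCQ_le ppg i pk m) hne
    · rw [fpvCQ_zero_of_nopk ppg i pk m hl]
      omega
  rw [hsplit, fpv_inner_partial ppg i w pc vc pk vl m (by omega) (by omega) (by omega)]
  exact ⟨_, _, rfl⟩

-- ---------- sparse-table lemmas ----------

-- 2^(pyBitLength m - 1) ≤ m < 2^(pyBitLength m) for m ≥ 1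
theorem pyBitLength_bounds : ∀ m : Nat, 1 ≤ m →
    2 ^ (pyBitLength m - 1) ≤ m ∧ m < 2 ^ (pyBitLength m) := by
  intro m
  induction m using Nat.strong_induction_on with
  | _ m ih =>
    intro hm
    match m, hm with
    | 1, _ =>
      simp [pyBitLength]
    | (n + 2), _ =>
      have hrec : pyBitLength (n + 2) = pyBitLength ((n + 2) / 2) + 1 := by
        rw [show n + 2 = (n + 1) + 1 from rfl, pyBitLength]
      have hhalf1 : 1 ≤ (n + 2) / 2 := by omega
      have hhalf2 : (n + 2) / 2 < n + 2 := by omega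
      obtain ⟨hl, hr⟩ := ih _ hhalf2 hhalf1
      have hbl1 : 1 ≤ pyBitLength ((n + 2) / 2) := by
        rcases Nat.exists_eq_add_of_le hhalf1 with ⟨c, hc⟩
        rw [hc, Nat.add_comm, pyBitLength]
        omega
      rw [hrec]
      constructor
      · have : 2 ^ (pyBitLength ((n + 2) / 2) + 1 - 1) = 2 * 2 ^ (pyBitLength ((n + 2) / 2) - 1) := by
          rw [Nat.add_sub_cancel, ← Nat.pow_succ']
          congr 1
          omega
        rw [this]
        omega
      · rw [Nat.pow_succ]
        omega

-- level invariant: L.getD j 0 is an element of the window [j, j+2^m) of ppg and an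
-- r-upper bound for it
def StLev (r : Int → Int → Prop) (ppg : List Int) (m : Nat) (L : List Int) : Prop :=
  ∀ j : Nat, j + 2 ^ m ≤ ppg.length →
    (∃ t : Nat, j ≤ t ∧ t < j + 2 ^ m ∧ L.getD j 0 = ppg.getD t 0) ∧
    (∀ t : Nat, j ≤ t → t < j + 2 ^ m → r (ppg.getD t 0) (L.getD j 0))

theorem StLev_base (r : Int → Int → Prop) (hrefl : ∀ a, r a a) (ppg : List Int) :
    StLev r ppg 0 ppg := by
  intro j hj
  refine ⟨⟨j, le_refl _, by omega, rfl⟩, ?_⟩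
  intro t ht1 ht2
  have : t = j := by simp at ht2 ⊢; omega
  subst this
  exact hrefl _

theorem StLev_step (f : Int → Int → Int) (r : Int → Int → Prop)
    (hsel : ∀ a b, f a b = a ∨ f a b = b)
    (hbl : ∀ a b, r a (f a b)) (hbr : ∀ a b, r b (f a b))
    (htrans : ∀ a b c, r a b → r b c → r a c)
    (ppg prev : List Int) (m : Nat) (h : StLev r ppg m prev) :
    StLev r ppg (m + 1)
      ((List.range (ppg.length - 2 ^ (m + 1) + 1)).map
        (fun j => f (prev.getD j 0) (prev.getD (j + 2 ^ m) 0))) := by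
  intro j hj
  have hm1 : 1 ≤ 2 ^ m := Nat.one_le_two_pow
  have hjlt : j < ppg.length - 2 ^ (m + 1) + 1 := by
    have : 1 ≤ 2 ^ (m + 1) := Nat.one_le_two_pow
    omega
  have hget : ((List.range (ppg.length - 2 ^ (m + 1) + 1)).map
      (fun j => f (prev.getD j 0) (prev.getD (j + 2 ^ m) 0))).getD j 0
      = f (prev.getD j 0) (prev.getD (j + 2 ^ m) 0) := by
    rw [List.getD_eq_getElem _ _ (by simpa using hjlt)]
    simp
  rw [hget]
  have h1 := h j (by omega)
  have h2 := h (j + 2 ^ m) (by omega)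
  constructor
  · rcases hsel (prev.getD j 0) (prev.getD (j + 2 ^ m) 0) with he | he
    · obtain ⟨t, ht1, ht2, ht3⟩ := h1.1
      exact ⟨t, ht1, by omega, by rw [he, ht3]⟩
    · obtain ⟨t, ht1, ht2, ht3⟩ := h2.1
      exact ⟨t, by omega, by omega, by rw [he, ht3]⟩
  · intro t ht1 ht2
    by_cases hc : t < j + 2 ^ m
    · exact htrans _ _ _ (h1.2 t ht1 hc) (hbl _ _)
    · exact htrans _ _ _ (h2.2 t (by omega) (by omega)) (hbr _ _)

theorem stBuild_lev (f : Int → Int → Int) (r : Int → Int → Prop)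
    (hsel : ∀ a b, f a b = a ∨ f a b = b)
    (hbl : ∀ a b, r a (f a b)) (hbr : ∀ a b, r b (f a b))
    (htrans : ∀ a b c, r a b → r b c → r a c)
    (ppg : List Int) :
    ∀ (fuel k : Nat) (prev : List Int), 1 ≤ k → StLev r ppg (k - 1) prev →
      ∀ i : Nat, i < fuel → 2 ^ (k + i) ≤ ppg.length →
        StLev r ppg (k + i) ((stBuild f prev ppg.length k fuel).getD i []) := by
  intro fuel
  induction fuel with
  | zero => intro k prev _ _ i hi; omega
  | succ fuel ih =>
    intro k prev hk hprev i hi hipow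
    have h2k : 2 ^ k ≤ ppg.length :=
      le_trans (Nat.pow_le_pow_right (by omega) (by omega)) hipow
    rw [stBuild, if_pos h2k]
    have hcur : StLev r ppg k ((List.range (ppg.length - 2 ^ k + 1)).map
        (fun j => f (prev.getD j 0) (prev.getD (j + 2 ^ (k - 1)) 0))) := by
      have := StLev_step f r hsel hbl hbr htrans ppg prev (k - 1) hprev
      rwa [show k - 1 + 1 = k by omega] at this
    match i with
    | 0 => simpa using hcur
    | i + 1 =>
      have := ih (k + 1) _ (by omega) (by simpa using hcur) i (by omega)
        (by rw [show k + 1 + i = k + (i + 1) by omega]; exact hipow)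
      rw [show k + 1 + i = k + (i + 1) by omega] at this
      simpa using this

theorem stLevels_lev (f : Int → Int → Int) (r : Int → Int → Prop)
    (hsel : ∀ a b, f a b = a ∨ f a b = b)
    (hbl : ∀ a b, r a (f a b)) (hbr : ∀ a b, r b (f a b))
    (htrans : ∀ a b c, r a b → r b c → r a c) (hrefl : ∀ a, r a a)
    (ppg : List Int) (m : Nat) (hm : 2 ^ m ≤ ppg.length) :
    StLev r ppg m ((ppg :: stBuild f ppg ppg.length 1 ppg.length).getD m []) := by
  match m with
  | 0 => simpa using StLev_base r hrefl ppg
  | m + 1 =>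
    have hmn : m < ppg.length := by
      have h1 : m + 1 < 2 ^ (m + 1) := Nat.lt_two_pow_self
      omega
    have := stBuild_lev f r hsel hbl hbr htrans ppg ppg.length 1 ppg
      (by omega) (by simpa using StLev_base r hrefl ppg) m hmn
      (by rw [show 1 + m = m + 1 by omega]; exact hm)
    rw [show 1 + m = m + 1 by omega] at this
    simpa using this

-- the query returns an element of ppg[a..b] that r-bounds the whole range
theorem stQuery_spec (f : Int → Int → Int) (r : Int → Int → Prop)
    (hsel : ∀ a b, f a b = a ∨ f a b = b)
    (hbl : ∀ a b, r a (f a b)) (hbr : ∀ a b, r b (f a b))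
    (htrans : ∀ a b c, r a b → r b c → r a c) (hrefl : ∀ a, r a a)
    (ppg : List Int) (a b : Int) (h0 : 0 ≤ a) (hab : a ≤ b) (hb : b < (ppg.length : Int)) :
    (∃ t : Nat, a ≤ (t : Int) ∧ (t : Int) ≤ b ∧
        stQuery (ppg :: stBuild f ppg ppg.length 1 ppg.length) f a b = ppg.getD t 0) ∧
    (∀ t : Nat, a ≤ (t : Int) → (t : Int) ≤ b →
        r (ppg.getD t 0) (stQuery (ppg :: stBuild f ppg ppg.length 1 ppg.length) f a b)) := by
  have hlen1 : 1 ≤ (b - a + 1).toNat := by omega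
  obtain ⟨hbl1, hbl2⟩ := pyBitLength_bounds _ hlen1
  set k := pyBitLength (b - a + 1).toNat - 1 with hk
  have hk0 : 1 ≤ (2 ^ k : Nat) := Nat.one_le_two_pow
  have hbl3 : 1 ≤ pyBitLength (b - a + 1).toNat := by
    rcases Nat.exists_eq_add_of_le hlen1 with ⟨c, hc⟩
    rw [hc, Nat.add_comm, pyBitLength]
    omega
  have hk1 : 2 ^ k ≤ (b - a + 1).toNat := hbl1
  have hk2 : (b - a + 1).toNat < 2 ^ (k + 1) := by
    rw [hk, show pyBitLength (b - a + 1).toNat - 1 + 1 = pyBitLength (b - a + 1).toNat by omega]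
    exact hbl2
  have hkI1 : ((2 ^ k : Nat) : Int) ≤ b - a + 1 := by omega
  have hkI2 : b - a + 1 < 2 * ((2 ^ k : Nat) : Int) := by
    have : (b - a + 1).toNat < 2 ^ (k + 1) := hk2
    have h2 : (2 ^ (k + 1) : Nat) = 2 * 2 ^ k := by rw [Nat.pow_succ]; omega
    omega
  have h2kn : 2 ^ k ≤ ppg.length := by omega
  have hlev := stLevels_lev f r hsel hbl hbr htrans hrefl ppg k h2kn
  set row := ((ppg :: stBuild f ppg ppg.length 1 ppg.length).getD k []) with hrow
  have hq : stQuery (ppg :: stBuild f ppg ppg.length 1 ppg.length) f a b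
      = f (PySem.List.pyGetD row a 0) (PySem.List.pyGetD row (b - (2 ^ k : Nat) + 1) 0) := by
    rfl
  set j1 : Nat := a.toNat with hj1
  set j2 : Nat := (b - (2 ^ k : Nat) + 1).toNat with hj2
  have hj2nn : 0 ≤ b - ((2 ^ k : Nat) : Int) + 1 := by omega
  have hg1 : PySem.List.pyGetD row a 0 = row.getD j1 0 := by
    rw [show a = ((j1 : Nat) : Int) by omega, PySem.List.pyGetD_natCast]
  have hg2 : PySem.List.pyGetD row (b - (2 ^ k : Nat) + 1) 0 = row.getD j2 0 := by
    rw [show b - ((2 ^ k : Nat) : Int) + 1 = ((j2 : Nat) : Int) by omega, PySem.List.pyGetD_natCast]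
  have hb1 : j1 + 2 ^ k ≤ ppg.length := by omega
  have hb2 : j2 + 2 ^ k ≤ ppg.length := by omega
  have hw1 := hlev j1 hb1
  have hw2 := hlev j2 hb2
  rw [hq, hg1, hg2]
  constructor
  · rcases hsel (row.getD j1 0) (row.getD j2 0) with he | he
    · obtain ⟨t, ht1, ht2, ht3⟩ := hw1.1
      exact ⟨t, by omega, by omega, by rw [he, ht3]⟩
    · obtain ⟨t, ht1, ht2, ht3⟩ := hw2.1
      exact ⟨t, by omega, by omega, by rw [he, ht3]⟩
  · intro t ht1 ht2
    by_cases hc : t < j1 + 2 ^ k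
    · exact htrans _ _ _ (hw1.2 t (by omega) hc) (hbl _ _)
    · exact htrans _ _ _ (hw2.2 t (by omega) (by omega)) (hbr _ _)

-- max-table characterizations
theorem stQuery_max_lt_iff (ppg : List Int) (a b v : Int)
    (h0 : 0 ≤ a) (hab : a ≤ b) (hb : b < (ppg.length : Int)) :
    stQuery (ppg :: stBuild (fun a b => max a b) ppg ppg.length 1 ppg.length)
        (fun a b => max a b) a b < v ↔
      ∀ t : Nat, a ≤ (t : Int) → (t : Int) ≤ b → ppg.getD t 0 < v := by
  obtain ⟨⟨t0, ht1, ht2, ht3⟩, hbnd⟩ := stQuery_spec (fun a b => max a b) (· ≤ ·)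
    (fun a b => max_choice a b)
    (fun a b => le_max_left a b) (fun a b => le_max_right a b)
    (fun a b c => le_trans) (fun a => le_refl a) ppg a b h0 hab hb
  constructor
  · intro h t hta htb
    exact lt_of_le_of_lt (hbnd t hta htb) h
  · intro h
    rw [ht3]
    exact h t0 ht1 ht2

theorem stQuery_max_le_iff (ppg : List Int) (a b v : Int)
    (h0 : 0 ≤ a) (hab : a ≤ b) (hb : b < (ppg.length : Int)) :
    stQuery (ppg :: stBuild (fun a b => max a b) ppg ppg.length 1 ppg.length)
        (fun a b => max a b) a b ≤ v ↔
      ∀ t : Nat, a ≤ (t : Int) → (t : Int) ≤ b → ppg.getD t 0 ≤ v := by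
  obtain ⟨⟨t0, ht1, ht2, ht3⟩, hbnd⟩ := stQuery_spec (fun a b => max a b) (· ≤ ·)
    (fun a b => max_choice a b)
    (fun a b => le_max_left a b) (fun a b => le_max_right a b)
    (fun a b c => le_trans) (fun a => le_refl a) ppg a b h0 hab hb
  constructor
  · intro h t hta htb
    exact le_trans (hbnd t hta htb) h
  · intro h
    rw [ht3]
    exact h t0 ht1 ht2

-- min-table characterizations
theorem stQuery_min_gt_iff (ppg : List Int) (a b v : Int)
    (h0 : 0 ≤ a) (hab : a ≤ b) (hb : b < (ppg.length : Int)) :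
    v < stQuery (ppg :: stBuild (fun a b => min a b) ppg ppg.length 1 ppg.length)
        (fun a b => min a b) a b ↔
      ∀ t : Nat, a ≤ (t : Int) → (t : Int) ≤ b → v < ppg.getD t 0 := by
  obtain ⟨⟨t0, ht1, ht2, ht3⟩, hbnd⟩ := stQuery_spec (fun a b => min a b) (fun x y => y ≤ x)
    (fun a b => min_choice a b)
    (fun a b => min_le_left a b) (fun a b => min_le_right a b)
    (fun a b c h1 h2 => le_trans h2 h1) (fun a => le_refl a) ppg a b h0 hab hb
  constructor
  · intro h t hta htb
    exact lt_of_lt_of_le h (hbnd t hta htb)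
  · intro h
    rw [ht3]
    exact h t0 ht1 ht2

theorem stQuery_min_ge_iff (ppg : List Int) (a b v : Int)
    (h0 : 0 ≤ a) (hab : a ≤ b) (hb : b < (ppg.length : Int)) :
    v ≤ stQuery (ppg :: stBuild (fun a b => min a b) ppg ppg.length 1 ppg.length)
        (fun a b => min a b) a b ↔
      ∀ t : Nat, a ≤ (t : Int) → (t : Int) ≤ b → v ≤ ppg.getD t 0 := by
  obtain ⟨⟨t0, ht1, ht2, ht3⟩, hbnd⟩ := stQuery_spec (fun a b => min a b) (fun x y => y ≤ x)
    (fun a b => min_choice a b)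
    (fun a b => min_le_left a b) (fun a b => min_le_right a b)
    (fun a b c h1 h2 => le_trans h2 h1) (fun a => le_refl a) ppg a b h0 hab hb
  constructor
  · intro h t hta htb
    exact le_trans h (hbnd t hta htb)
  · intro h
    rw [ht3]
    exact h t0 ht1 ht2

-- pyGetD at an in-range Int index, in getD form
theorem fpv_pyGetD_toNat (ppg : List Int) (x : Int) (h0 : 0 ≤ x) (_hx : x < (ppg.length : Int)) :
    PySem.List.pyGetD ppg x 0 = ppg.getD x.toNat 0 := by
  have h1 : PySem.List.pyGetD ppg ((x.toNat : Nat) : Int) 0 = ppg.getD x.toNat 0 :=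
    PySem.List.pyGetD_natCast ppg x.toNat 0
  rwa [show ((x.toNat : Nat) : Int) = x by omega] at h1

-- B's peak test (two range-max queries) = A's per-offset peak comparisons
theorem fpv_peakcond_iff (ppg : List Int) (i w : Int) (hw : 1 ≤ w) (hiw : w < i)
    (hin : i < (ppg.length : Int) - w) :
    (PySem.List.pyGetD ppg i 0 >
        stQuery (ppg :: stBuild (fun a b => max a b) ppg ppg.length 1 ppg.length)
          (fun a b => max a b) (i - w) (i - 1) ∧
      PySem.List.pyGetD ppg i 0 ≥
        stQuery (ppg :: stBuild (fun a b => max a b) ppg ppg.length 1 ppg.length)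
          (fun a b => max a b) (i + 1) (i + w))
    ↔ ∀ j : Int, 1 ≤ j → j ≤ w → fpvP ppg i j = true := by
  rw [gt_iff_lt, ge_iff_le,
    stQuery_max_lt_iff ppg (i - w) (i - 1) _ (by omega) (by omega) (by omega),
    stQuery_max_le_iff ppg (i + 1) (i + w) _ (by omega) (by omega) (by omega)]
  constructor
  · rintro ⟨hL, hR⟩ j hj1 hjw
    rw [fpvP_iff]
    constructor
    · have := hL (i - j).toNat (by omega) (by omega)
      rwa [← fpv_pyGetD_toNat ppg (i - j) (by omega) (by omega)] at this
    · have := hR (i + j).toNat (by omega) (by omega)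
      rwa [← fpv_pyGetD_toNat ppg (i + j) (by omega) (by omega)] at this
  · intro h
    constructor
    · intro t hta htb
      have := ((fpvP_iff ppg i (i - (t : Int))).1 (h (i - (t : Int)) (by omega) (by omega))).1
      rwa [show i - (i - (t : Int)) = ((t : Nat) : Int) by omega, PySem.List.pyGetD_natCast] at this
    · intro t hta htb
      have := ((fpvP_iff ppg i ((t : Int) - i)).1 (h ((t : Int) - i) (by omega) (by omega))).2
      rwa [show i + ((t : Int) - i) = ((t : Nat) : Int) by omega, PySem.List.pyGetD_natCast] at this

-- B's valley test (two range-min queries) = A's per-offset valley comparisons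
theorem fpv_valleycond_iff (ppg : List Int) (i w : Int) (hw : 1 ≤ w) (hiw : w < i)
    (hin : i < (ppg.length : Int) - w) :
    (PySem.List.pyGetD ppg i 0 <
        stQuery (ppg :: stBuild (fun a b => min a b) ppg ppg.length 1 ppg.length)
          (fun a b => min a b) (i - w) (i - 1) ∧
      PySem.List.pyGetD ppg i 0 ≤
        stQuery (ppg :: stBuild (fun a b => min a b) ppg ppg.length 1 ppg.length)
          (fun a b => min a b) (i + 1) (i + w))
    ↔ ∀ j : Int, 1 ≤ j → j ≤ w → fpvQ ppg i j = true := by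
  rw [stQuery_min_gt_iff ppg (i - w) (i - 1) _ (by omega) (by omega) (by omega),
    stQuery_min_ge_iff ppg (i + 1) (i + w) _ (by omega) (by omega) (by omega)]
  constructor
  · rintro ⟨hL, hR⟩ j hj1 hjw
    rw [fpvQ_iff]
    constructor
    · have := hL (i - j).toNat (by omega) (by omega)
      rwa [← fpv_pyGetD_toNat ppg (i - j) (by omega) (by omega)] at this
    · have := hR (i + j).toNat (by omega) (by omega)
      rwa [← fpv_pyGetD_toNat ppg (i + j) (by omega) (by omega)] at this
  · intro h
    constructor
    · intro t hta htb
      have := ((fpvQ_iff ppg i (i - (t : Int))).1 (h (i - (t : Int)) (by omega) (by omega))).1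
      rwa [show i - (i - (t : Int)) = ((t : Nat) : Int) by omega, PySem.List.pyGetD_natCast] at this
    · intro t hta htb
      have := ((fpvQ_iff ppg i ((t : Int) - i)).1 (h ((t : Int) - i) (by omega) (by omega))).2
      rwa [show i + ((t : Int) - i) = ((t : Nat) : Int) by omega, PySem.List.pyGetD_natCast] at this

-- A's window update expression = B's negative-index form, on the freshly appended list
theorem fpv_wupdate_eq (pk : List Int) (i : Int) (hpk : pk ≠ []) :
    PySem.List.pyGetD (pk ++ [i]) ((pk.length : Nat) : Int) 0 -
        PySem.List.pyGetD (pk ++ [i]) (((pk.length : Nat) : Int) - 1) 0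
      = PySem.List.pyGetD (pk ++ [i]) (-1) 0 - PySem.List.pyGetD (pk ++ [i]) (-2) 0 := by
  have hlen : 0 < pk.length := List.length_pos_of_ne_nil hpk
  have e1 : PySem.List.pyGetD (pk ++ [i]) ((pk.length : Nat) : Int) 0 = i := by
    rw [PySem.List.pyGetD_natCast]
    simp [List.getD]
  have e1' : PySem.List.pyGetD (pk ++ [i]) (-1) 0 = i :=
    PySem.List.pyGetD_neg_one_append_singleton pk i 0
  have e2 : PySem.List.pyGetD (pk ++ [i]) (((pk.length : Nat) : Int) - 1) 0
      = (pk ++ [i])[pk.length - 1]'(by simp) := by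
    rw [PySem.List.pyGetD_eq_getElem (pk ++ [i]) 0 (by omega) (by simp)]
    congr 1
    omega
  have e2' : PySem.List.pyGetD (pk ++ [i]) (-2) 0
      = (pk ++ [i])[(pk ++ [i]).length - 2]'(by simp) := by
    rw [PySem.List.pyGetD_neg_ofNat (pk ++ [i]) 2 0 (by omega) (by simp only [List.length_append, List.length_cons, List.length_nil]; omega)]
  rw [e1, e1', e2, e2']
  congr 1
  simp

-- the interior iteration: A's counting loop (plus counter reset) matches B's query branch
theorem fpv_interior (ppg : List Int) (i w vc : Int) (pk vl : List Int)
    (hwi : w < i) (hin : i < (ppg.length : Int) - w) :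
    FpvRel
      { (PySem.List.pyRange 0 (w + 1) 1).foldl (fpvStepJ ppg i)
          ⟨0, 0, ((pk.length : Nat) : Int), vc, pk, vl, w⟩ with mmax := 0, mmin := 0 }
      (if 1 ≤ w then
        (if PySem.List.pyGetD ppg i 0 >
              stQuery (ppg :: stBuild (fun a b => max a b) ppg ppg.length 1 ppg.length)
                (fun a b => max a b) (i - w) (i - 1) ∧
            PySem.List.pyGetD ppg i 0 ≥
              stQuery (ppg :: stBuild (fun a b => max a b) ppg ppg.length 1 ppg.length)
                (fun a b => max a b) (i + 1) (i + w) then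
          (⟨pk ++ [i], vl,
            if 1 < (((pk ++ [i]).length : Nat) : Int) then
              pyCeilDiv (PySem.List.pyGetD (pk ++ [i]) (-1) 0 - PySem.List.pyGetD (pk ++ [i]) (-2) 0) 2
            else w⟩ : FpvAltSt)
        else if pk ≠ [] ∧ PySem.List.pyGetD ppg i 0 <
              stQuery (ppg :: stBuild (fun a b => min a b) ppg ppg.length 1 ppg.length)
                (fun a b => min a b) (i - w) (i - 1) ∧
            PySem.List.pyGetD ppg i 0 ≤
              stQuery (ppg :: stBuild (fun a b => min a b) ppg ppg.length 1 ppg.length)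
                (fun a b => min a b) (i + 1) (i + w) then
          (⟨pk, vl ++ [i], w⟩ : FpvAltSt)
        else (⟨pk, vl, w⟩ : FpvAltSt))
      else (⟨pk, vl, w⟩ : FpvAltSt)) := by
  by_cases hw1 : 1 ≤ w
  · rw [if_pos hw1]
    by_cases hP : ∀ j : Int, 1 ≤ j → j ≤ w → fpvP ppg i j = true
    · rw [fpv_inner_peak ppg i w ((pk.length : Nat) : Int) vc pk vl hw1 hP]
      rw [if_pos ((fpv_peakcond_iff ppg i w hw1 hwi hin).2 hP)]
      refine ⟨rfl, rfl, ?_, rfl, rfl, ?_⟩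
      · simp
      · simp only
        by_cases hpk : pk = []
        · subst hpk
          norm_num
        · have hc : (1 : Int) < (((pk ++ [i]).length : Nat) : Int) := by
            have := List.length_pos_of_ne_nil hpk
            simp
            omega
          rw [if_pos hc, if_pos hc, fpv_wupdate_eq pk i hpk]
    · by_cases hQ : (pk ≠ [] ∧ ∀ j : Int, 1 ≤ j → j ≤ w → fpvQ ppg i j = true)
      · rw [fpv_inner_valley ppg i w ((pk.length : Nat) : Int) vc pk vl hw1 hQ.1 hQ.2]
        rw [if_neg (fun hc => hP ((fpv_peakcond_iff ppg i w hw1 hwi hin).1 hc))]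
        rw [if_pos ⟨hQ.1, ((fpv_valleycond_iff ppg i w hw1 hwi hin).2 hQ.2).1,
          ((fpv_valleycond_iff ppg i w hw1 hwi hin).2 hQ.2).2⟩]
        exact ⟨rfl, rfl, rfl, rfl, rfl, rfl⟩
      · obtain ⟨cp, cq, hfold⟩ := fpv_inner_none ppg i w ((pk.length : Nat) : Int) vc pk vl hw1 hP
          (fun hc => hQ ⟨by
              intro hnil
              rw [hnil] at hc
              simp at hc, hc.2⟩)
        rw [hfold]
        rw [if_neg (fun hc => hP ((fpv_peakcond_iff ppg i w hw1 hwi hin).1 hc))]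
        rw [if_neg (fun hc => hQ ⟨hc.1, (fpv_valleycond_iff ppg i w hw1 hwi hin).1 ⟨hc.2.1, hc.2.2⟩⟩)]
        exact ⟨rfl, rfl, rfl, rfl, rfl, rfl⟩
  · rw [if_neg hw1, fpv_inner_trivial ppg i w _ (by omega)]
    exact ⟨rfl, rfl, rfl, rfl, rfl, rfl⟩

theorem fpv_stepI_rel (ppg : List Int) (wmax i : Int) (sa : FpvSt) (sb : FpvAltSt)
    (h : FpvRel sa sb) :
    FpvRel (fpvStepI ppg (ppg.length : Int) wmax sa i)
      (fpvAltStep ppg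
        (ppg :: stBuild (fun a b => max a b) ppg ppg.length 1 ppg.length)
        (ppg :: stBuild (fun a b => min a b) ppg ppg.length 1 ppg.length)
        (ppg.length : Int) wmax sb i) := by
  obtain ⟨pk2, vl2, wb⟩ := sb
  obtain ⟨mmax, mmin, pc, vc, pk, vl, wa⟩ := sa
  obtain ⟨h1, h2, h3, h4, h5, h6⟩ := h
  simp only at h1 h2 h3 h4 h5 h6
  subst h1; subst h2; subst h4; subst h5; subst h6; subst h3
  simp only [fpvStepI, fpvAltStep]
  by_cases hint : (wa < i ∧ i < (ppg.length : Int) - wa)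
  · rw [if_pos hint, if_pos hint]
    by_cases hcap : wmax < wa
    · simp only [hcap, ite_true]
      exact fpv_interior ppg i wmax vc pk vl (by omega) (by omega)
    · simp only [hcap, ite_false]
      exact fpv_interior ppg i wa vc pk vl (by omega) (by omega)
  · rw [if_neg hint, if_neg hint]
    exact ⟨rfl, rfl, rfl, rfl, rfl, rfl⟩

theorem fpv_foldl_rel (ppg : List Int) (wmax : Int) (l : List Int) (sa : FpvSt) (sb : FpvAltSt)
    (h : FpvRel sa sb) :
    FpvRel (l.foldl (fpvStepI ppg (ppg.length : Int) wmax) sa)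
      (l.foldl (fpvAltStep ppg
        (ppg :: stBuild (fun a b => max a b) ppg ppg.length 1 ppg.length)
        (ppg :: stBuild (fun a b => min a b) ppg ppg.length 1 ppg.length)
        (ppg.length : Int) wmax) sb) := by
  induction l generalizing sa sb with
  | nil => exact h
  | cons x t ih => exact ih _ _ (fpv_stepI_rel ppg wmax x sa sb h)

-- ===== VERDICT (by name: the statement is the Claim_ definition above) =====
theorem find_peak_valley_spec : Claim_equal_find_peak_valley := by
  intro sr ppg _
  unfold Spec_find_peak_valley find_peak_valley find_peak_valley_alt
  have h := fpv_foldl_rel ppg (pyCeilDiv sr 2)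
    (PySem.List.pyRange 0 (ppg.length : Int) 1) ⟨0, 0, 0, 0, [], [], pyCeilDiv sr 8⟩
    ⟨[], [], pyCeilDiv sr 8⟩ (by simp [FpvRel])
  obtain ⟨-, -, -, h4, h5, -⟩ := h
  simp only []
  rw [h4, h5]
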